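-- pv_equiv track=rewrite | github.com/jskim7018/leetcode_study | algorithm_study/2026/03/20260314/easy/LC_3861.py | minimumIndex
-- ===== SOURCE A (Python) =====
-- def minimumIndex(capacity: list[int], itemSize: int) -> int:
--     minim_idx = -1
--     minim = float('inf')
--     for i in range(len(capacity)):
--         if itemSize <= capacity[i]:
--             if minim > capacity[i]:
--                 minim = capacity[i]
--                 minim_idx = i
--     return minim_idx
-- ===== SOURCE B (Python) =====
-- def minimumIndex(capacity: list[int], itemSize: int) -> int:
--     for c, i in sorted((c, i) for i, c in enumerate(capacity)):
--         if c >= itemSize: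
--             return i
--     return -1
-- ===== Notes on version B (the rewrite author's own statement) =====
-- stated objective: alternative
-- what changed: Replaces the single-pass tracking loop (inf sentinel + best index) by sort-then-scan: sort the (capacity, index) pairs lexicographically and return the index of the first sorted pair whose capacity meets the threshold; lexicographic order makes the first hit the minimal qualifying capacity with the earliest index.
import Mathlib
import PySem

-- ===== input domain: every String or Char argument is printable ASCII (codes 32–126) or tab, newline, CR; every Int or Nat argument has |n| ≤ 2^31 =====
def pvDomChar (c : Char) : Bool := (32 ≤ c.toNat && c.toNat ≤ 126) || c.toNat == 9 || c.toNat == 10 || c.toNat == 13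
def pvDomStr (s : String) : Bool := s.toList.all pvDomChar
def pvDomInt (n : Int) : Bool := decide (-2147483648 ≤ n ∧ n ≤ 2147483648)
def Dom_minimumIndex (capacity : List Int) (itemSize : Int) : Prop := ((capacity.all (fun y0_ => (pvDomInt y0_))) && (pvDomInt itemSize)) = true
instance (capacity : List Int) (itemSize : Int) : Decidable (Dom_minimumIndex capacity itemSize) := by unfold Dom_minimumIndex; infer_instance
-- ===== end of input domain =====

-- B replaces A's single-pass tracking loop by sort-then-scan: sort the (capacity, index)
-- pairs lexicographically and return the index of the first sorted pair meeting the
-- threshold; objective: alternative (a different algorithm of similar size).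

-- ===== PORT A =====
-- state: (minim : Option Int — none is the float('inf') sentinel, minim_idx : Int)
def minimumIndex (capacity : List Int) (itemSize : Int) : Int :=
  ((PySem.List.pyRange 0 capacity.length 1).foldl
    (fun (st : Option Int × Int) i =>
      if itemSize ≤ PySem.List.pyGetD capacity i 0 then
        match st.1 with
        | none => (some (PySem.List.pyGetD capacity i 0), i)
        | some m =>
          if PySem.List.pyGetD capacity i 0 < m then (some (PySem.List.pyGetD capacity i 0), i)
          else st
      else st)
    (none, -1)).2

-- ===== PORT B =====
-- Source B's 'for c, i in sorted(...): if c >= itemSize: return i' loop with early return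
def pvScan (itemSize : Int) : List (Int × Int) → Int
  | [] => -1
  | (c, i) :: t => if itemSize ≤ c then i else pvScan itemSize t

def minimumIndex_alt (capacity : List Int) (itemSize : Int) : Int :=
  pvScan itemSize
    (PySem.List.sorted2
      ((PySem.List.enumerate capacity 0).map (fun p => (p.2, p.1)))
      Prod.fst Prod.snd false)

-- ===== PRECONDITION & SPEC =====
def Spec_minimumIndex (capacity : List Int) (itemSize : Int) (out : Int) : Prop := out = minimumIndex_alt capacity itemSize
instance (capacity : List Int) (itemSize : Int) (out : Int) : Decidable (Spec_minimumIndex capacity itemSize out) := by unfold Spec_minimumIndex; infer_instance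

-- ===== CLAIM (what is proved, stated in full; the proofs are below) =====
def Claim_equal_minimumIndex : Prop := ∀ (capacity : List Int) (itemSize : Int), Dom_minimumIndex capacity itemSize → Spec_minimumIndex capacity itemSize (minimumIndex capacity itemSize)

-- ===== LEMMAS AND PROOFS =====

-- lexicographic order on (capacity, index) pairs, the order B sorts by
def pvLexLe (p q : Int × Int) : Prop := p.1 < q.1 ∨ (p.1 = q.1 ∧ p.2 ≤ q.2)

-- A's loop body, on (index, capacity) pairs
def pvStep (itemSize : Int) (st : Option Int × Int) (p : Int × Int) : Option Int × Int :=
  if itemSize ≤ p.2 then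
    match st.1 with
    | none => (some p.2, p.1)
    | some m => if p.2 < m then (some p.2, p.1) else st
  else st

-- sorted2's comparator at keys fst, snd
def pvBefore (a b : Int × Int) : Bool :=
  decide (a.1 < b.1) || (!decide (b.1 < a.1) && decide (a.2 < b.2))

lemma pvStep_eq (capacity : List Int) (itemSize : Int) :
    (fun (st : Option Int × Int) i =>
      if itemSize ≤ PySem.List.pyGetD capacity i 0 then
        match st.1 with
        | none => (some (PySem.List.pyGetD capacity i 0), i)
        | some m =>
          if PySem.List.pyGetD capacity i 0 < m then (some (PySem.List.pyGetD capacity i 0), i)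
          else st
      else st)
  = (fun st i => pvStep itemSize st (i, PySem.List.pyGetD capacity i 0)) := rfl

lemma pvLexLe_refl (p : Int × Int) : pvLexLe p p := by unfold pvLexLe; omega

lemma pvLexLe_trans {p q r : Int × Int} (h1 : pvLexLe p q) (h2 : pvLexLe q r) : pvLexLe p r := by
  unfold pvLexLe at *; omega

lemma pvLexLe_antisymm {p q : Int × Int} (h1 : pvLexLe p q) (h2 : pvLexLe q p) : p = q := by
  unfold pvLexLe at *
  have : p.1 = q.1 ∧ p.2 = q.2 := by omega
  exact Prod.ext this.1 this.2

lemma pvBefore_true {a b : Int × Int} (h : pvBefore a b = true) : pvLexLe a b := by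
  unfold pvBefore at h; unfold pvLexLe; simp at h; omega

lemma pvBefore_false {a b : Int × Int} (h : pvBefore a b = false) : pvLexLe b a := by
  unfold pvBefore at h; unfold pvLexLe; simp at h; omega

-- A's fold from a started state: the result is the lex-min of the start pair and the qualifiers
lemma pvFold_some (itemSize : Int) :
    ∀ (P : List (Int × Int)) (m idx : Int),
      itemSize ≤ m → (∀ p ∈ P, idx < p.1) → P.Pairwise (fun p q => p.1 < q.1) →
      ∃ m' idx', P.foldl (pvStep itemSize) (some m, idx) = (some m', idx') ∧
        itemSize ≤ m' ∧ ((m', idx') = (m, idx) ∨ (idx', m') ∈ P) ∧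
        pvLexLe (m', idx') (m, idx) ∧
        ∀ p ∈ P, itemSize ≤ p.2 → pvLexLe (m', idx') (p.2, p.1) := by
  intro P
  induction P with
  | nil =>
    intro m idx hm _ _
    exact ⟨m, idx, rfl, hm, Or.inl rfl, pvLexLe_refl _, by simp⟩
  | cons p t ih =>
    intro m idx hm hidx hpw
    obtain ⟨pi, pc⟩ := p
    have hpw' : t.Pairwise (fun p q => p.1 < q.1) := hpw.of_cons
    have hpt : ∀ q ∈ t, (pi, pc).1 < q.1 := (List.pairwise_cons.mp hpw).1
    by_cases hq : itemSize ≤ pc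
    · by_cases hlt : pc < m
      · -- update to (pc, pi)
        obtain ⟨m', idx', hfold, hm', hmem, hle, hmin⟩ := ih pc pi hq hpt hpw'
        refine ⟨m', idx', ?_, hm', ?_, ?_, ?_⟩
        · simp [pvStep, hq, hlt, hfold]
        · rcases hmem with h | h
          · right
            rw [Prod.mk.injEq] at h
            rw [h.1, h.2]
            exact List.mem_cons_self
          · exact Or.inr (List.mem_cons_of_mem _ h)
        · exact pvLexLe_trans hle (by unfold pvLexLe; omega)
        · intro r hr hqr
          rcases List.mem_cons.mp hr with h | h
          · rw [h]; exact hle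
          · exact hmin r h hqr
      · -- keep (m, idx)
        obtain ⟨m', idx', hfold, hm', hmem, hle, hmin⟩ :=
          ih m idx hm (fun q hq' => hidx q (List.mem_cons_of_mem _ hq')) hpw'
        have hpidx : idx < pi := hidx (pi, pc) List.mem_cons_self
        refine ⟨m', idx', ?_, hm', ?_, hle, ?_⟩
        · simp [pvStep, hq, hlt, hfold]
        · rcases hmem with h | h
          · exact Or.inl h
          · exact Or.inr (List.mem_cons_of_mem _ h)
        · intro r hr hqr
          rcases List.mem_cons.mp hr with h | h
          · rw [h]; unfold pvLexLe at hle ⊢; simp at hle ⊢; omega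
          · exact hmin r h hqr
    · obtain ⟨m', idx', hfold, hm', hmem, hle, hmin⟩ :=
        ih m idx hm (fun q hq' => hidx q (List.mem_cons_of_mem _ hq')) hpw'
      refine ⟨m', idx', ?_, hm', ?_, hle, ?_⟩
      · simp [pvStep, hq, hfold]
      · rcases hmem with h | h
        · exact Or.inl h
        · exact Or.inr (List.mem_cons_of_mem _ h)
      · intro r hr hqr
        rcases List.mem_cons.mp hr with h | h
        · rw [h] at hqr; exact absurd hqr hq
        · exact hmin r h hqr

-- A's fold from the initial state
lemma pvFold_none (itemSize : Int) :
    ∀ (P : List (Int × Int)), P.Pairwise (fun p q => p.1 < q.1) →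
      (P.foldl (pvStep itemSize) (none, -1) = (none, -1) ∧ ∀ p ∈ P, ¬ itemSize ≤ p.2)
      ∨ ∃ m' idx', P.foldl (pvStep itemSize) (none, -1) = (some m', idx') ∧
          itemSize ≤ m' ∧ (idx', m') ∈ P ∧
          ∀ p ∈ P, itemSize ≤ p.2 → pvLexLe (m', idx') (p.2, p.1) := by
  intro P
  induction P with
  | nil => intro _; left; exact ⟨rfl, by simp⟩
  | cons p t ih =>
    intro hpw
    obtain ⟨pi, pc⟩ := p
    have hpw' : t.Pairwise (fun p q => p.1 < q.1) := hpw.of_cons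
    have hpt : ∀ q ∈ t, (pi, pc).1 < q.1 := (List.pairwise_cons.mp hpw).1
    by_cases hq : itemSize ≤ pc
    · right
      obtain ⟨m', idx', hfold, hm', hmem, hle, hmin⟩ := pvFold_some itemSize t pc pi hq hpt hpw'
      refine ⟨m', idx', ?_, hm', ?_, ?_⟩
      · simp [pvStep, hq, hfold]
      · rcases hmem with h | h
        · rw [Prod.mk.injEq] at h
          rw [h.1, h.2]
          exact List.mem_cons_self
        · exact List.mem_cons_of_mem _ h
      · intro r hr hqr
        rcases List.mem_cons.mp hr with h | h
        · rw [h]; exact hle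
        · exact hmin r h hqr
    · rcases ih hpw' with ⟨hfold, hfail⟩ | ⟨m', idx', hfold, hm', hmem, hmin⟩
      · left
        refine ⟨by simp [pvStep, hq, hfold], ?_⟩
        intro r hr
        rcases List.mem_cons.mp hr with h | h
        · rw [h]; exact hq
        · exact hfail r h
      · right
        refine ⟨m', idx', by simp [pvStep, hq, hfold], hm', List.mem_cons_of_mem _ hmem, ?_⟩
        intro r hr hqr
        rcases List.mem_cons.mp hr with h | h
        · rw [h] at hqr; exact absurd hqr hq
        · exact hmin r h hqr

-- B's sort produces a pvLexLe-sorted list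
lemma pvInsertBy_pairwise (x : Int × Int) :
    ∀ (l : List (Int × Int)), l.Pairwise pvLexLe →
      (PySem.List.insertBy pvBefore x l).Pairwise pvLexLe := by
  intro l
  induction l with
  | nil => intro _; simp [PySem.List.insertBy]
  | cons y ys ih =>
    intro hpw
    have hpw' : ys.Pairwise pvLexLe := hpw.of_cons
    have hyys : ∀ z ∈ ys, pvLexLe y z := (List.pairwise_cons.mp hpw).1
    by_cases hb : pvBefore x y = true
    · simp only [PySem.List.insertBy, hb, if_pos]
      refine List.pairwise_cons.mpr ⟨?_, hpw⟩
      intro z hz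
      rcases List.mem_cons.mp hz with h | h
      · rw [h]; exact pvBefore_true hb
      · exact pvLexLe_trans (pvBefore_true hb) (hyys z h)
    · simp only [PySem.List.insertBy, hb, if_neg, Bool.not_eq_true]
      refine List.pairwise_cons.mpr ⟨?_, ih hpw'⟩
      intro z hz
      rcases (PySem.List.mem_insertBy pvBefore x z ys).mp hz with h | h
      · rw [h]; exact pvBefore_false (by simpa using hb)
      · exact hyys z h

lemma pvSorted2_pairwise (S : List (Int × Int)) :
    (PySem.List.sorted2 S Prod.fst Prod.snd false).Pairwise pvLexLe := by
  have key : ∀ (l acc : List (Int × Int)), acc.Pairwise pvLexLe →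
      (l.foldl (fun acc x => PySem.List.insertBy pvBefore x acc) acc).Pairwise pvLexLe := by
    intro l
    induction l with
    | nil => intro acc h; exact h
    | cons x t ih => intro acc h; exact ih _ (pvInsertBy_pairwise x acc h)
  have : PySem.List.sorted2 S Prod.fst Prod.snd false
      = S.foldl (fun acc x => PySem.List.insertBy pvBefore x acc) [] := rfl
  rw [this]
  exact key S [] List.Pairwise.nil

-- the scan over a pvLexLe-sorted list: all-fail, or the first hit is the lex-min qualifier
lemma pvScan_fail (itemSize : Int) :
    ∀ (L : List (Int × Int)), (∀ p ∈ L, ¬ itemSize ≤ p.1) → pvScan itemSize L = -1 := by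
  intro L
  induction L with
  | nil => intro _; rfl
  | cons p t ih =>
    intro hf
    obtain ⟨c, i⟩ := p
    have : ¬ itemSize ≤ c := hf (c, i) List.mem_cons_self
    simp only [pvScan, if_neg this]
    exact ih (fun q hq => hf q (List.mem_cons_of_mem _ hq))

lemma pvScan_hit (itemSize : Int) :
    ∀ (L : List (Int × Int)), L.Pairwise pvLexLe →
      ∀ q ∈ L, itemSize ≤ q.1 →
        ∃ r ∈ L, itemSize ≤ r.1 ∧ pvScan itemSize L = r.2 ∧
          ∀ p ∈ L, itemSize ≤ p.1 → pvLexLe r p := by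
  intro L
  induction L with
  | nil => intro _ q hq; exact absurd hq (List.not_mem_nil)
  | cons p t ih =>
    intro hpw q hq hql
    have hpw' : t.Pairwise pvLexLe := hpw.of_cons
    have hpt : ∀ z ∈ t, pvLexLe p z := (List.pairwise_cons.mp hpw).1
    obtain ⟨c, i⟩ := p
    by_cases hc : itemSize ≤ c
    · refine ⟨(c, i), List.mem_cons_self, hc, by simp [pvScan, hc], ?_⟩
      intro r hr _
      rcases List.mem_cons.mp hr with h | h
      · rw [h]; exact pvLexLe_refl _
      · exact hpt r h
    · have hqt : q ∈ t := by
        rcases List.mem_cons.mp hq with h | h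
        · rw [h] at hql; exact absurd hql hc
        · exact h
      obtain ⟨r, hrmem, hrq, hscan, hrmin⟩ := ih hpw' q hqt hql
      refine ⟨r, List.mem_cons_of_mem _ hrmem, hrq, by simp [pvScan, hc, hscan], ?_⟩
      intro z hz hzq
      rcases List.mem_cons.mp hz with h | h
      · rw [h] at hzq; exact absurd hzq hc
      · exact hrmin z h hzq

-- membership in the swapped pair list
lemma pvMem_swap (capacity : List Int) (p : Int × Int) :
    p ∈ (PySem.List.enumerate capacity 0).map (fun p => (p.2, p.1)) ↔
      (p.2, p.1) ∈ PySem.List.enumerate capacity 0 := by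
  constructor
  · intro h
    obtain ⟨a, ha, hae⟩ := List.mem_map.mp h
    subst hae
    simpa using ha
  · intro h
    exact List.mem_map.mpr ⟨(p.2, p.1), h, rfl⟩

-- ===== VERDICT (by name: the statement is the Claim_ definition above) =====
theorem minimumIndex_spec : Claim_equal_minimumIndex := by
  intro capacity itemSize _
  show minimumIndex capacity itemSize = minimumIndex_alt capacity itemSize
  unfold minimumIndex minimumIndex_alt
  rw [pvStep_eq capacity itemSize]
  have henum : PySem.List.enumerate capacity 0
      = (PySem.List.pyRange 0 capacity.length 1).map
          (fun j => (j, PySem.List.pyGetD capacity j 0)) := by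
    simpa using PySem.List.enumerate_eq_map_pyRange (xs := capacity) (d := 0)
  have hfold : (PySem.List.pyRange 0 (capacity.length : Int) 1).foldl
        (fun st i => pvStep itemSize st (i, PySem.List.pyGetD capacity i 0)) (none, -1)
      = (PySem.List.enumerate capacity 0).foldl (pvStep itemSize) (none, -1) := by
    rw [henum, List.foldl_map]
  rw [hfold]
  set P := PySem.List.enumerate capacity 0 with hP
  set S := P.map (fun p => (p.2, p.1)) with hS
  set L := PySem.List.sorted2 S Prod.fst Prod.snd false with hL
  have hperm : L.Perm S := PySem.List.sorted2_perm S Prod.fst Prod.snd false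
  have hLpw : L.Pairwise pvLexLe := pvSorted2_pairwise S
  have hPpw : P.Pairwise (fun p q => p.1 < q.1) := PySem.List.pairwise_lt_enumerate capacity 0
  rcases pvFold_none itemSize P hPpw with ⟨hfe, hfail⟩ | ⟨m', idx', hfe, hm', hmem, hmin⟩
  · rw [hfe]
    have : ∀ p ∈ L, ¬ itemSize ≤ p.1 := by
      intro p hp
      have hpS : p ∈ S := hperm.mem_iff.mp hp
      have := (pvMem_swap capacity p).mp (hS ▸ hpS)
      exact hfail (p.2, p.1) (hP ▸ this)
    rw [pvScan_fail itemSize L this]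
  · rw [hfe]
    have hmS : (m', idx') ∈ S := by
      rw [hS]; exact (pvMem_swap capacity (m', idx')).mpr hmem
    have hmL : (m', idx') ∈ L := hperm.mem_iff.mpr hmS
    obtain ⟨r, hrL, hrq, hscan, hrmin⟩ := pvScan_hit itemSize L hLpw (m', idx') hmL hm'
    rw [hscan]
    have hrS : r ∈ S := hperm.mem_iff.mp hrL
    have hrP : (r.2, r.1) ∈ P := (pvMem_swap capacity r).mp (hS ▸ hrS)
    have h1 : pvLexLe (m', idx') r := by
      have := hmin (r.2, r.1) hrP (by simpa using hrq)
      simpa using this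
    have h2 : pvLexLe r (m', idx') := hrmin (m', idx') hmL hm'
    have : r = (m', idx') := pvLexLe_antisymm h2 h1
    rw [this]
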